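-- pv_equiv track=rewrite | github.com/rkarmuri/My_DSA_Practice_Problems | Sliding Window/cardPoints.py | cardPoints
-- ===== SOURCE A (Python) =====
-- def cardPoints(nums,k):
--     lsum = rsum = maxSum = 0
--     rIndex = len(nums) - 1
--
--     for i in range(k):
--         lsum = lsum + nums[i]
--
--     maxSum = lsum
--
--     for i in range(k-1,-1,-1):
--         lsum = lsum - nums[i]
--         rsum = rsum + nums[rIndex]
--         maxSum = max(maxSum, lsum + rsum)
--
--         rIndex = rIndex - 1
--
--     return maxSum
-- ===== SOURCE B (Python) =====
-- def cardPoints(nums, k):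
--     n = len(nums)
--     total = sum(nums)
--     m = n - k
--     if m <= 0:
--         return total
--     win = sum(nums[:m])
--     best = win
--     for i in range(m, n):
--         win += nums[i] - nums[i - m]
--         if win < best:
--             best = win
--     return total - best
-- ===== Notes on version B (the rewrite author's own statement) =====
-- stated objective: alternative
-- what changed: A takes k cards greedily from both ends with two running end-sums over 2k loop iterations; B instead computes total - (minimum sum of a contiguous interior window of size len(nums)-k) with a single sliding-window pass over the untaken middle.
import Mathlib
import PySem

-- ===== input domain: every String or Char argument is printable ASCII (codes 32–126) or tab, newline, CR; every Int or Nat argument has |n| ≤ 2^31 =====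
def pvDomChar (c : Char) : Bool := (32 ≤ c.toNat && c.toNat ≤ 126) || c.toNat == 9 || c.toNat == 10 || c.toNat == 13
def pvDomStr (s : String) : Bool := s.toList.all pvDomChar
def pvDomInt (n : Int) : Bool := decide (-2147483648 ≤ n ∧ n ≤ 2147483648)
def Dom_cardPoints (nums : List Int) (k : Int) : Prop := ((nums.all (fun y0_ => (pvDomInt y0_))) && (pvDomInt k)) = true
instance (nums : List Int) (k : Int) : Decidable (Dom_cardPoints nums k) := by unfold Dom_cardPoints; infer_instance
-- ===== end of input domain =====

-- B replaces A's take-from-both-ends two-accumulator loop by 'total minus the minimum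
-- interior window of size n-k' (one sliding-window pass); equal cost, different algorithm.

-- ===== PORT A =====
def cardPoints (nums : List Int) (k : Int) : Int :=
  -- lsum = rsum = maxSum = 0; rIndex = len(nums)-1; for i in range(k): lsum += nums[i]
  let lsum0 : Int := (PySem.List.pyRange 0 k 1).foldl
      (fun lsum i => lsum + PySem.List.pyGetD nums i 0) 0
  -- maxSum = lsum; for i in range(k-1,-1,-1): …
  let st := (PySem.List.pyRange (k - 1) (-1) (-1)).foldl
      (fun (st : Int × Int × Int × Int) i =>
        let lsum := st.1 - PySem.List.pyGetD nums i 0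
        let rsum := st.2.1 + PySem.List.pyGetD nums st.2.2.2 0
        (lsum, rsum, max st.2.2.1 (lsum + rsum), st.2.2.2 - 1))
      (lsum0, 0, lsum0, (nums.length : Int) - 1)
  st.2.2.1

-- ===== PORT B =====
def cardPoints_alt (nums : List Int) (k : Int) : Int :=
  let n : Int := nums.length
  let total : Int := nums.sum
  let m : Int := n - k
  if m ≤ 0 then total
  else
    let win0 : Int := (PySem.List.slice nums none (some m)).sum   -- sum(nums[:m])
    let st := (PySem.List.pyRange m n 1).foldl
      (fun (st : Int × Int) i =>
        let win := st.1 + PySem.List.pyGetD nums i 0 - PySem.List.pyGetD nums (i - m) 0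
        (win, if win < st.2 then win else st.2))
      (win0, win0)
    total - st.2

-- ===== PRECONDITION & SPEC =====
-- Pre_ excludes exactly the inputs where A raises IndexError (k > len(nums), reached by nums[i] in A's first loop).
def Pre_cardPoints (nums : List Int) (k : Int) : Prop := k ≤ (nums.length : Int)
instance (nums : List Int) (k : Int) : Decidable (Pre_cardPoints nums k) := by unfold Pre_cardPoints; infer_instance
def pvWitness_cardPoints : List Int × Int := ([1, 2, 3, 4], 2)

def Spec_cardPoints (nums : List Int) (k : Int) (out : Int) : Prop := out = cardPoints_alt nums k
instance (nums : List Int) (k : Int) (out : Int) : Decidable (Spec_cardPoints nums k out) := by unfold Spec_cardPoints; infer_instance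

-- ===== CLAIM (what is proved, stated in full; the proofs are below) =====
def Claim_equal_cardPoints : Prop := ∀ (nums : List Int) (k : Int), Dom_cardPoints nums k → Pre_cardPoints nums k → Spec_cardPoints nums k (cardPoints nums k)

-- ===== LEMMAS AND PROOFS =====

-- prefix sum of the first t cards, suffix sum of the last j cards, sum of the window [t, t+m)
def pvPre (nums : List Int) (t : Nat) : Int := (nums.take t).sum
def pvSuf (nums : List Int) (j : Nat) : Int := (nums.drop (nums.length - j)).sum
def pvMid (nums : List Int) (m t : Nat) : Int := ((nums.drop t).take m).sum
def pvF (nums : List Int) (kn t : Nat) : Int := pvPre nums t + pvSuf nums (kn - t)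

theorem pv_foldl_max_init {α : Type} (l : List α) (f : α → Int) :
    ∀ (M x : Int), l.foldl (fun a t => max a (f t)) (max M x)
      = max (l.foldl (fun a t => max a (f t)) M) x := by
  induction l with
  | nil => intro M x; rfl
  | cons a l ih =>
      intro M x
      simp only [List.foldl_cons]
      rw [show max (max M x) (f a) = max (max M (f a)) x by omega, ih, ih]

theorem pv_foldl_max_swap {α : Type} (l : List α) (f : α → Int) (M x : Int) :
    max (l.foldl (fun a t => max a (f t)) M) x
      = max (l.foldl (fun a t => max a (f t)) x) M := by
  rw [← pv_foldl_max_init, ← pv_foldl_max_init, max_comm M x]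

theorem pv_foldl_min_sub {α : Type} (l : List α) (g : α → Int) :
    ∀ (T x : Int), T - l.foldl (fun a t => min a (g t)) x
      = l.foldl (fun a t => max a (T - g t)) (T - x) := by
  induction l with
  | nil => intro T x; rfl
  | cons a l ih =>
      intro T x
      simp only [List.foldl_cons]
      rw [ih T (min x (g a)), show T - min x (g a) = max (T - x) (T - g a) by omega]

theorem pv_foldl_max_const {α : Type} (l : List α) (f : α → Int) (M : Int)
    (h : ∀ t ∈ l, f t = M) : l.foldl (fun a t => max a (f t)) M = M := by
  induction l with
  | nil => rfl
  | cons a l ih =>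
      simp only [List.foldl_cons]
      rw [h a (by simp), max_self]
      exact ih (fun t ht => h t (by simp [ht]))

theorem pv_foldl_max_shift (f : Nat → Int) :
    ∀ (c : Nat), (List.range c).foldl (fun a t => max a (f (t + 1))) (f 0)
      = (List.range c).foldl (fun a t => max a (f t)) (f c) := by
  intro c
  induction c with
  | zero => rfl
  | succ c ih =>
      rw [List.range_succ, List.foldl_append, List.foldl_append, ih]
      simp only [List.foldl_cons, List.foldl_nil]
      rw [pv_foldl_max_swap]

theorem pv_pre_succ (nums : List Int) (t : Nat) (ht : t < nums.length) :
    pvPre nums (t + 1) = pvPre nums t + nums.getD t 0 := by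
  unfold pvPre
  rw [List.sum_take_succ _ t ht, List.getD_eq_getElem _ _ ht]

theorem pv_suf_succ (nums : List Int) (j : Nat) (hj : j < nums.length) :
    pvSuf nums (j + 1) = pvSuf nums j + nums.getD (nums.length - j - 1) 0 := by
  unfold pvSuf
  have hi : nums.length - (j + 1) < nums.length := by omega
  rw [List.drop_eq_getElem_cons hi, List.sum_cons,
      show nums.length - (j + 1) + 1 = nums.length - j from by omega,
      List.getD_eq_getElem _ _ (show nums.length - j - 1 < nums.length from by omega)]
  have he : nums[nums.length - (j + 1)]'hi
      = nums[nums.length - j - 1]'(show nums.length - j - 1 < nums.length from by omega) := by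
    congr 1
  rw [he, add_comm]

theorem pv_mid_succ (nums : List Int) (m t : Nat) (hm : 0 < m) (h : t + m < nums.length) :
    pvMid nums m (t + 1) = pvMid nums m t + nums.getD (t + m) 0 - nums.getD t 0 := by
  obtain ⟨mm, rfl⟩ : ∃ mm, m = mm + 1 := ⟨m - 1, by omega⟩
  unfold pvMid
  have ht : t < nums.length := by omega
  have hmm : mm < (nums.drop (t + 1)).length := by simp; omega
  rw [List.drop_eq_getElem_cons ht, List.take_succ_cons, List.sum_cons,
      List.sum_take_succ _ mm hmm,
      List.getD_eq_getElem _ _ (show t + (mm + 1) < nums.length from by omega),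
      List.getD_eq_getElem _ _ ht]
  have he : (nums.drop (t + 1))[mm]'hmm
      = nums[t + (mm + 1)]'(show t + (mm + 1) < nums.length from by omega) := by
    rw [List.getElem_drop]
    congr 1; omega
  rw [he]; ring

theorem pv_total_split (nums : List Int) (kn m t : Nat) (hmn : m + kn = nums.length)
    (ht : t ≤ kn) : nums.sum = pvPre nums t + pvMid nums m t + pvSuf nums (kn - t) := by
  unfold pvPre pvMid pvSuf
  conv_lhs => rw [← List.take_append_drop (t + m) nums]
  rw [List.sum_append, List.take_add, List.sum_append,
      show nums.length - (kn - t) = t + m from by omega]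

theorem pv_firstA (nums : List Int) (kn : Nat) (hk : kn ≤ nums.length) :
    (PySem.List.pyRange 0 (kn : Int) 1).foldl
        (fun lsum i => lsum + PySem.List.pyGetD nums i 0) 0 = pvPre nums kn := by
  induction kn with
  | zero =>
      rw [PySem.List.pyRange_one_eq_nil (by omega)]
      simp [pvPre]
  | succ c ih =>
      rw [show ((c + 1 : Nat) : Int) = (c : Int) + 1 from by push_cast; ring,
          PySem.List.pyRange_one_succ_right (by omega), List.foldl_append,
          ih (by omega)]
      simp only [List.foldl_cons, List.foldl_nil, PySem.List.pyGetD_natCast]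
      rw [pv_pre_succ nums c (by omega), List.getD]

theorem pv_loopA (nums : List Int) (kn : Nat) (hk : kn ≤ nums.length) :
    ∀ (c : Nat), c ≤ kn → ∀ (M : Int),
      ((PySem.List.pyRange ((c : Int) - 1) (-1) (-1)).foldl
        (fun (st : Int × Int × Int × Int) i =>
          let lsum := st.1 - PySem.List.pyGetD nums i 0
          let rsum := st.2.1 + PySem.List.pyGetD nums st.2.2.2 0
          (lsum, rsum, max st.2.2.1 (lsum + rsum), st.2.2.2 - 1))
        (pvPre nums c, pvSuf nums (kn - c), M,
          (nums.length : Int) - ((kn : Int) - (c : Int)) - 1)).2.2.1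
      = (List.range c).foldl (fun a t => max a (pvF nums kn t)) M := by
  intro c
  induction c with
  | zero =>
      intro _ M
      rw [show ((0 : Nat) : Int) - 1 = -1 from by norm_num,
          PySem.List.pyRange_neg_one_eq_nil (by omega)]
      simp
  | succ c ih =>
      intro hc M
      simp only [] at ih ⊢
      rw [show ((c + 1 : Nat) : Int) - 1 = (c : Int) from by push_cast; ring,
          PySem.List.pyRange_neg_one_cons (by omega), List.foldl_cons]
      simp only []
      have hlsum : pvPre nums (c + 1) - PySem.List.pyGetD nums (c : Int) 0 = pvPre nums c := by
        rw [PySem.List.pyGetD_natCast, pv_pre_succ nums c (by omega)]; ring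
      have hidx : (nums.length : Int) - ((kn : Int) - ((c + 1 : Nat) : Int)) - 1
          = ((nums.length - (kn - (c + 1)) - 1 : Nat) : Int) := by push_cast; omega
      have hrsum : pvSuf nums (kn - (c + 1))
            + PySem.List.pyGetD nums ((nums.length : Int) - ((kn : Int) - ((c + 1 : Nat) : Int)) - 1) 0
          = pvSuf nums (kn - c) := by
        rw [hidx, PySem.List.pyGetD_natCast,
            show kn - c = (kn - (c + 1)) + 1 from by omega,
            pv_suf_succ nums (kn - (c + 1)) (by omega)]
      rw [hlsum, hrsum]
      have hridx : (nums.length : Int) - ((kn : Int) - ((c + 1 : Nat) : Int)) - 1 - 1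
          = (nums.length : Int) - ((kn : Int) - (c : Int)) - 1 := by push_cast; ring
      rw [hridx, ih (by omega) (max M (pvPre nums c + pvSuf nums (kn - c))),
          List.range_succ, List.foldl_append]
      simp only [List.foldl_cons, List.foldl_nil]
      rw [show pvPre nums c + pvSuf nums (kn - c) = pvF nums kn c from rfl,
          pv_foldl_max_init]

theorem pv_loopB (nums : List Int) (m kn : Nat) (hm : 0 < m) (hmn : m + kn = nums.length) :
    ∀ (c : Nat), c ≤ kn →
      (PySem.List.pyRange (m : Int) ((m : Int) + (c : Int)) 1).foldl
        (fun (st : Int × Int) i =>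
          let win := st.1 + PySem.List.pyGetD nums i 0 - PySem.List.pyGetD nums (i - (m : Int)) 0
          (win, if win < st.2 then win else st.2))
        (pvMid nums m 0, pvMid nums m 0)
      = (pvMid nums m c,
         (List.range c).foldl (fun a t => min a (pvMid nums m (t + 1))) (pvMid nums m 0)) := by
  intro c
  induction c with
  | zero =>
      intro _
      rw [show (m : Int) + ((0 : Nat) : Int) = (m : Int) from by norm_num,
          PySem.List.pyRange_one_eq_nil (by omega)]
      simp
  | succ c ih =>
      intro hc
      simp only [] at ih ⊢
      rw [show (m : Int) + ((c + 1 : Nat) : Int) = ((m : Int) + (c : Int)) + 1 from by push_cast; ring,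
          PySem.List.pyRange_one_succ_right (by omega), List.foldl_append,
          ih (by omega)]
      simp only [List.foldl_cons, List.foldl_nil]
      have hwin : pvMid nums m c + PySem.List.pyGetD nums ((m : Int) + (c : Int)) 0
            - PySem.List.pyGetD nums ((m : Int) + (c : Int) - (m : Int)) 0
          = pvMid nums m (c + 1) := by
        rw [show (m : Int) + (c : Int) = ((m + c : Nat) : Int) from by push_cast; ring,
            show ((m + c : Nat) : Int) - (m : Int) = ((c : Nat) : Int) from by push_cast; ring,
            PySem.List.pyGetD_natCast, PySem.List.pyGetD_natCast,
            pv_mid_succ nums m c hm (by omega),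
            show m + c = c + m from by omega]
      rw [hwin, List.range_succ, List.foldl_append]
      simp only [List.foldl_cons, List.foldl_nil]
      have : (if pvMid nums m (c + 1) < (List.range c).foldl (fun a t => min a (pvMid nums m (t + 1))) (pvMid nums m 0)
              then pvMid nums m (c + 1)
              else (List.range c).foldl (fun a t => min a (pvMid nums m (t + 1))) (pvMid nums m 0))
          = min ((List.range c).foldl (fun a t => min a (pvMid nums m (t + 1))) (pvMid nums m 0)) (pvMid nums m (c + 1)) := by
        rw [min_def]; split_ifs <;> omega
      rw [this]

theorem pv_suf_zero (nums : List Int) : pvSuf nums 0 = 0 := by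
  simp [pvSuf]

theorem pv_A_char (nums : List Int) (kn : Nat) (hk : kn ≤ nums.length) :
    cardPoints nums (kn : Int)
      = (List.range kn).foldl (fun a t => max a (pvF nums kn t)) (pvPre nums kn) := by
  have h := pv_loopA nums kn hk kn le_rfl (pvPre nums kn)
  rw [Nat.sub_self, pv_suf_zero, sub_self, sub_zero] at h
  unfold cardPoints
  simp only []
  rw [pv_firstA nums kn hk]
  exact h

theorem pv_B_char (nums : List Int) (m kn : Nat) (hm : 0 < m) (hmn : m + kn = nums.length) :
    cardPoints_alt nums (kn : Int)
      = nums.sum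
        - (List.range kn).foldl (fun a t => min a (pvMid nums m (t + 1))) (pvMid nums m 0) := by
  have h := pv_loopB nums m kn hm hmn kn le_rfl
  unfold cardPoints_alt
  simp only []
  rw [show (nums.length : Int) - (kn : Int) = (m : Int) from by omega,
      if_neg (by omega : ¬ (m : Int) ≤ 0),
      PySem.List.slice_to_natCast,
      show (nums.take m).sum = pvMid nums m 0 from by simp [pvMid],
      show (nums.length : Int) = (m : Int) + (kn : Int) from by omega,
      h]

-- ===== VERDICT (by name: the statement is the Claim_ definition above) =====
theorem cardPoints_spec : Claim_equal_cardPoints := by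
  intro nums k _ hpre
  unfold Spec_cardPoints
  unfold Pre_cardPoints at hpre
  by_cases hk0 : k ≤ 0
  · have hA : cardPoints nums k = 0 := by
      unfold cardPoints
      rw [PySem.List.pyRange_one_eq_nil (by omega),
          PySem.List.pyRange_neg_one_eq_nil (by omega)]
      simp
    have hB : cardPoints_alt nums k = 0 := by
      unfold cardPoints_alt
      simp only []
      by_cases hm : (nums.length : Int) - k ≤ 0
      · rw [if_pos hm]
        have hnil : nums = [] := List.length_eq_zero_iff.mp (by omega)
        simp [hnil]
      · rw [if_neg hm, PySem.List.pyRange_one_eq_nil (by omega)]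
        simp only [List.foldl_nil]
        rw [show PySem.List.slice nums none (some ((nums.length : Int) - k)) = nums from by
              rw [PySem.List.slice_to nums (by omega)]
              exact List.take_of_length_le (by omega)]
        ring
    rw [hA, hB]
  · replace hk0 : 0 < k := by omega
    obtain ⟨kn, hkn⟩ : ∃ kn : Nat, (kn : Int) = k := ⟨k.toNat, Int.toNat_of_nonneg (by omega)⟩
    subst hkn
    have hk : kn ≤ nums.length := by exact_mod_cast hpre
    rw [pv_A_char nums kn hk]
    by_cases hkeq : kn = nums.length
    · have hB : cardPoints_alt nums (kn : Int) = nums.sum := by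
        unfold cardPoints_alt
        simp only []
        rw [if_pos (by omega : (nums.length : Int) - (kn : Int) ≤ 0)]
      rw [hB]
      subst hkeq
      rw [show pvPre nums nums.length = nums.sum from by simp [pvPre]]
      apply pv_foldl_max_const
      intro t ht
      have ht' : t ≤ nums.length := by
        simp only [List.mem_range] at ht; omega
      have hsplit := pv_total_split nums nums.length 0 t (by omega) ht'
      have hmid : pvMid nums 0 t = 0 := by simp [pvMid]
      unfold pvF
      omega
    · have hm0 : 0 < nums.length - kn := by omega
      have hmn : (nums.length - kn) + kn = nums.length := by omega
      rw [pv_B_char nums (nums.length - kn) kn hm0 hmn, pv_foldl_min_sub]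
      have htot : ∀ t, t ≤ kn → nums.sum - pvMid nums (nums.length - kn) t = pvF nums kn t := by
        intro t ht
        have hsplit := pv_total_split nums kn (nums.length - kn) t hmn ht
        unfold pvF
        omega
      rw [htot 0 (by omega)]
      have hcong : (List.range kn).foldl
            (fun a t => max a (nums.sum - pvMid nums (nums.length - kn) (t + 1))) (pvF nums kn 0)
          = (List.range kn).foldl (fun a t => max a (pvF nums kn (t + 1))) (pvF nums kn 0) := by
        apply PySem.List.foldl_congr_mem
        intro acc t htl
        rw [htot (t + 1) (by simp only [List.mem_range] at htl; omega)]
      rw [hcong, pv_foldl_max_shift,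
          show pvF nums kn kn = pvPre nums kn from by
            unfold pvF; rw [Nat.sub_self, pv_suf_zero]; ring]
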